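-- pv_equiv track=rewrite | github.com/shakfu/inferna | src/inferna/__main__.py | _cpu_features_from_info
-- ===== SOURCE A (Python) =====
-- def _cpu_features_from_info(info: dict[str, str]) -> list[str]:
--     """Extract enabled CPU features from system info dict."""
--     cpu_keys = [
--         "NEON",
--         "AVX",
--         "AVX2",
--         "AVX512",
--         "FMA",
--         "ARM_FMA",
--         "F16C",
--         "FP16_VA",
--         "DOTPROD",
--         "SSE3",
--         "WASM_SIMD",
--         "VSX",
--     ]
--     features = []
--     for key in cpu_keys:
--         for info_key, val in info.items():
--             if info_key.strip().endswith(key) and val == "1":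
--                 features.append(key)
--                 break
--     return features
-- ===== SOURCE B (Python) =====
-- def _cpu_features_from_info(info: dict[str, str]) -> list[str]:
--     """Extract enabled CPU features from system info dict."""
--     cpu_keys = [
--         "NEON",
--         "AVX",
--         "AVX2",
--         "AVX512",
--         "FMA",
--         "ARM_FMA",
--         "F16C",
--         "FP16_VA",
--         "DOTPROD",
--         "SSE3",
--         "WASM_SIMD",
--         "VSX",
--     ]
--     # Index of every suffix (up to the longest feature name, 9 chars) of each
--     # enabled, stripped info key; then an O(1) membership test per feature.
--     suffixes = set()
--     for info_key, val in info.items():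
--         if val == "1":
--             s = info_key.strip()
--             for n in range(1, min(len(s), 9) + 1):
--                 suffixes.add(s[-n:])
--     return [key for key in cpu_keys if key in suffixes]
-- ===== Notes on version B (the rewrite author's own statement) =====
-- stated objective: faster
-- what changed: B builds a hash-set index of every suffix (length 1..9, the longest feature name) of each enabled stripped info key in one pass, then filters cpu_keys by O(1) set membership, instead of A's per-feature endswith rescans of info with a break.
import Mathlib
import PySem

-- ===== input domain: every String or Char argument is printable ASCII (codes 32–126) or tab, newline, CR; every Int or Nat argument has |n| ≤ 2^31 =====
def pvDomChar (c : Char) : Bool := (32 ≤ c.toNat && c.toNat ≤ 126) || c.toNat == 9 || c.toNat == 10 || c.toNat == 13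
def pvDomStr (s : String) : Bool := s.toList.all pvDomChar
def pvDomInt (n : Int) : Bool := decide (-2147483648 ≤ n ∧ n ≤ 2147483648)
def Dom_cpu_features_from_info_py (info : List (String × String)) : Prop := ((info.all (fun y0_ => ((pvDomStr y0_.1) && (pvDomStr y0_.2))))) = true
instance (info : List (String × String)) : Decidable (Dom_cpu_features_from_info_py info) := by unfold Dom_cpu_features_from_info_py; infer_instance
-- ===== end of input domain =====

-- B replaces A's per-feature rescans of info by a suffix index: one pass collects every suffix
-- (up to 9 chars) of each enabled stripped key into a set, then cpu_keys is filtered by membership.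

-- the cpu_keys literal, shared verbatim by both Python sources
def pvCpuKeys : List String :=
  ["NEON", "AVX", "AVX2", "AVX512", "FMA", "ARM_FMA", "F16C", "FP16_VA",
   "DOTPROD", "SSE3", "WASM_SIMD", "VSX"]

-- ===== PORT A =====
-- A's inner 'for info_key, val in info.items(): … break' — first matching entry stops the scan
def pvInnerHit (info : List (String × String)) (key : String) : Bool :=
  match info with
  | [] => false
  | (info_key, val) :: rest =>
    if PySem.Str.endswith (PySem.Str.strip info_key) key && val == "1" then true
    else pvInnerHit rest key

def cpu_features_from_info_py (info : List (String × String)) : List String :=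
  pvCpuKeys.foldl (fun features key =>
    if pvInnerHit info key then features ++ [key] else features) []

-- ===== PORT B =====
def cpu_features_from_info_py_alt (info : List (String × String)) : List String :=
  let suffixes : PySem.Set String :=
    info.foldl (fun suffixes p =>
      if p.2 == "1" then
        let s := PySem.Str.strip p.1
        (PySem.List.pyRange 1 (min (PySem.Str.len s) 9 + 1) 1).foldl
          (fun suffixes n => PySem.Set.add suffixes (PySem.Str.slice s (some (-n)) none))
          suffixes
      else suffixes) PySem.Set.empty
  pvCpuKeys.filter (fun key => PySem.Set.contains suffixes key)

-- ===== PRECONDITION & SPEC =====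
def Spec_cpu_features_from_info_py (info : List (String × String)) (out : List String) : Prop := out = cpu_features_from_info_py_alt info
instance (info : List (String × String)) (out : List String) : Decidable (Spec_cpu_features_from_info_py info out) := by unfold Spec_cpu_features_from_info_py; infer_instance

-- ===== CLAIM (what is proved, stated in full; the proofs are below) =====
def Claim_equal_cpu_features_from_info_py : Prop := ∀ (info : List (String × String)), Dom_cpu_features_from_info_py info → Spec_cpu_features_from_info_py info (cpu_features_from_info_py info)

-- ===== LEMMAS AND PROOFS =====

-- whether some entry of info enables `key`
def pvHit (info : List (String × String)) (key : String) : Bool :=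
  info.any (fun p => PySem.Str.endswith (PySem.Str.strip p.1) key && p.2 == "1")

theorem pvInnerHit_eq_pvHit (info : List (String × String)) (key : String) :
    pvInnerHit info key = pvHit info key := by
  induction info with
  | nil => rfl
  | cons p rest ih =>
    obtain ⟨k, v⟩ := p
    simp [pvInnerHit, pvHit, List.any_cons] at *
    by_cases hv : v = "1" <;> simp [hv, ih]

theorem portA_eq_filter (info : List (String × String)) :
    cpu_features_from_info_py info = pvCpuKeys.filter (fun key => pvHit info key) := by
  unfold cpu_features_from_info_py
  simp only [pvInnerHit_eq_pvHit]
  simpa using PySem.List.foldl_append_if_eq_filter (fun key => pvHit info key) pvCpuKeys []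

-- adding f n for every n in L: membership afterwards
theorem contains_addfold (L : List Int) (f : Int → String) (s : PySem.Set String) (k : String) :
    PySem.Set.contains (L.foldl (fun s n => PySem.Set.add s (f n)) s) k
      = (PySem.Set.contains s k || L.any (fun n => f n == k)) := by
  induction L generalizing s with
  | nil => simp
  | cons x rest ih =>
    simp only [List.foldl_cons, List.any_cons, ih]
    by_cases hk : k = f x
    · subst hk; simp [PySem.Set.mem_add]
    · have hfx : (f x == k) = false := by
        simp only [beq_eq_false_iff_ne]; exact fun h => hk h.symm
      simp [PySem.Set.mem_add, hk, hfx]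

-- some suffix slice of s of length ≤ 9 equals k  ↔  s endswith k  (for 1 ≤ |k| ≤ 9)
theorem any_slice_eq_endswith (s k : String)
    (h1 : 1 ≤ k.toList.length) (h2 : k.toList.length ≤ 9) :
    (PySem.List.pyRange 1 (min (PySem.Str.len s) 9 + 1) 1).any
      (fun n => PySem.Str.slice s (some (-n)) none == k)
      = PySem.Str.endswith s k := by
  have hlen : PySem.Str.len s = (s.toList.length : Int) := by simp
  rw [Bool.eq_iff_iff]
  simp only [List.any_eq_true, PySem.List.mem_pyRange_one, beq_iff_eq,
    PySem.Str.endswith_eq, PySem.Chars.endswith_iff, hlen]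
  constructor
  · rintro ⟨n, ⟨hn1, hn2⟩, heq⟩
    have hnn : 0 ≤ n := by omega
    obtain ⟨m, rfl⟩ := Int.eq_ofNat_of_zero_le hnn
    have hSL : s.toList.length = s.length := by simp
    have hm1 : 0 < m := by exact_mod_cast hn1
    have hmle : m ≤ s.toList.length := by omega
    have hkl : k.toList = s.toList.drop (s.toList.length - m) := by
      rw [← String.toList_inj] at heq
      rw [← heq]
      simp [PySem.Str.toList_slice, PySem.Chars.slice_eq_listSlice,
        PySem.List.slice_from_neg_natCast s.toList m hm1]
    have hklen : k.toList.length = m := by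
      rw [hkl]; simp; omega
    exact List.suffix_iff_eq_drop.mpr (by rw [hklen, hkl])
  · intro hsuf
    have hSL : s.toList.length = s.length := by simp
    have hle := hsuf.length_le
    refine ⟨(k.toList.length : Int), ⟨by exact_mod_cast h1, by omega⟩, ?_⟩
    rw [← String.toList_inj]
    rw [PySem.Str.toList_slice, PySem.Chars.slice_eq_listSlice,
      PySem.List.slice_from_neg_natCast s.toList k.toList.length (by omega)]
    exact (List.suffix_iff_eq_drop.mp hsuf).symm

-- membership in B's suffix set after the outer fold
theorem contains_outer (info : List (String × String)) (s : PySem.Set String) (k : String)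
    (h1 : 1 ≤ k.toList.length) (h2 : k.toList.length ≤ 9) :
    PySem.Set.contains
      (info.foldl (fun suffixes p =>
        if p.2 == "1" then
          (PySem.List.pyRange 1 (min (PySem.Str.len (PySem.Str.strip p.1)) 9 + 1) 1).foldl
            (fun suffixes n => PySem.Set.add suffixes (PySem.Str.slice (PySem.Str.strip p.1) (some (-n)) none))
            suffixes
        else suffixes) s) k
      = (PySem.Set.contains s k || pvHit info k) := by
  induction info generalizing s with
  | nil => simp [pvHit]
  | cons p rest ih =>
    obtain ⟨ik, v⟩ := p
    simp only [List.foldl_cons]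
    split_ifs with hv
    · rw [ih, contains_addfold, any_slice_eq_endswith _ _ h1 h2]
      simp [pvHit, List.any_cons, hv, Bool.or_assoc]
    · rw [ih]
      have : (v == "1") = false := by simpa using hv
      simp [pvHit, List.any_cons, this]

theorem portB_eq_filter (info : List (String × String)) :
    cpu_features_from_info_py_alt info = pvCpuKeys.filter (fun key => pvHit info key) := by
  unfold cpu_features_from_info_py_alt
  apply List.filter_congr
  intro k hk
  have hb : 1 ≤ k.toList.length ∧ k.toList.length ≤ 9 := by
    fin_cases hk <;> simp
  rw [contains_outer info PySem.Set.empty k hb.1 hb.2]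
  simp [PySem.Set.empty]

-- ===== VERDICT (by name: the statement is the Claim_ definition above) =====
theorem cpu_features_from_info_py_spec : Claim_equal_cpu_features_from_info_py := by
  intro info _
  unfold Spec_cpu_features_from_info_py
  rw [portA_eq_filter, portB_eq_filter]
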